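/- GENERATED by farm/mkstatement.py from design/units.tsv (unit `vorbis_decode_packet_rest.3a`) and the assertions of Vorbis/Spec/PacketRest3.lean — do not edit.
   THE STATEMENT of the proof unit `vorbis_decode_packet_rest.3a`: segment 3a of `vorbis_decode_packet_rest` (47 instructions; entries 0x110e7e;
   exits 0x110d0a,0x110f3b,0x111000; ranges 0x110c5d-0x110c65 + 0x110e5b-0x110e6f + 0x110e7e-0x110f35)
   takes each of its entry assertions to one of its exit assertions (`Vorbis.Spec.vorbis_decode_packet_rest.Seg3a`), given the contracts of its callees.
   What the names mean: Vorbis/Spec/Basic.lean (the shared hypotheses), Vorbis/Spec/PacketRest3.lean (the assertions). The theorem to prove: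
   `theorem vorbis_decode_packet_rest_3a_ok : Vorbis.Spec.vorbis_decode_packet_rest_3a.Statement`. -/
import Vorbis.Spec.PacketRest3
import Vorbis.Spec.Reader
namespace Vorbis.Spec.vorbis_decode_packet_rest_3a
open X86 X86.User Asan

/-- The statement of unit `vorbis_decode_packet_rest.3a`. -/
def Statement : Prop :=
  ∀ (Lay : Layout) (_hLay : Lay.hi = 0x1000000) (μ : Microarch) (_hμ : UserX.MicroOK μ) (u₀ : State)
    (_hcode : HasCodeNat Lay u₀ Vorbis.L.vorbis_decode_packet_rest.entry Vorbis.Code.code_vorbis_decode_packet_rest.nat Vorbis.L.vorbis_decode_packet_rest.size)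
    (_h_prep_huffman : ∀ (others : List Obj) (frames : List (Nat × FrameLayout)) (Blk : Block → Prop) (len : Nat), Calls Lay μ Vorbis.WayInv (Vorbis.conv u₀) Vorbis.L.prep_huffman.entry (Vorbis.Spec.prep_huffman.spec others frames Blk len))
    (_h_asan_load1_noabort : Asan.SmallCheck Lay μ Vorbis.WayInv (Vorbis.CodeOK u₀) [.rax, .rdx] 1 Vorbis.L.__asan_load1_noabort.entry)
    (_h_asan_load8_noabort : Asan.SmallCheck Lay μ Vorbis.WayInv (Vorbis.CodeOK u₀) [.rax, .rcx, .rdx] 8 Vorbis.L.__asan_load8_noabort.entry)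
    (_h_asan_load4_noabort : Asan.SmallCheck Lay μ Vorbis.WayInv (Vorbis.CodeOK u₀) [.rax, .rcx, .rdx] 4 Vorbis.L.__asan_load4_noabort.entry),
    Vorbis.Spec.vorbis_decode_packet_rest.Seg3a Lay μ u₀

end Vorbis.Spec.vorbis_decode_packet_rest_3a
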